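-- pv_equiv track=rewrite | github.com/viking316/HR_daa | cloudy-day.py | maximumPeople
-- ===== SOURCE A (Python) =====
-- def maximumPeople(p, x, y, r):
--     # Number of towns
--     n = len(p)
--     # Number of clouds
--     m = len(y)
--
--     # Dictionary to store which towns are covered by which clouds
--     town_coverage = {i: [] for i in range(n)}
--
--     # Store population in sunny towns initially (without any cloud removal)
--     sunny_pop = sum(p)
--
--     # Track how many people are under each cloud
--     cloud_pop = [0] * m
--
--     # Track people that will be left in darkness regardless of cloud removal
--     dark_pop = 0
--
--     # Calculate coverage
--     for i in range(m):
--         cloud_start = y[i] - r[i]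
--         cloud_end = y[i] + r[i]
--         for j in range(n):
--             if cloud_start <= x[j] <= cloud_end:
--                 town_coverage[j].append(i)
--                 cloud_pop[i] += p[j]
--
--     # Calculate the initial population in sunny towns
--     for j in range(n):
--         if town_coverage[j]:
--             sunny_pop -= p[j]
--             if len(town_coverage[j]) > 1:
--                 dark_pop += p[j]
--
--     # Calculate the best cloud to remove
--     max_sunny_after_removal = sunny_pop
--
--     for i in range(m):
--         potential_sunny = sunny_pop
--         for j in range(n):
--             if len(town_coverage[j]) == 1 and town_coverage[j][0] == i:
--                 potential_sunny += p[j]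
--
--         max_sunny_after_removal = max(max_sunny_after_removal, potential_sunny)
--
--     return max_sunny_after_removal
-- ===== SOURCE B (Python) =====
-- def _cover(xj, bounds):
--     # index of the unique covering cloud, -1 if none, -2 if more than one
--     cover = -1
--     for i, (a, b) in enumerate(bounds):
--         if a <= xj <= b:
--             if cover != -1:
--                 return -2
--             cover = i
--     return cover
--
--
-- def maximumPeople(p, x, y, r):
--     bounds = [(yy - rr, yy + rr) for yy, rr in zip(y, r)]
--     sunny = 0
--     gain = [0] * len(y)
--     for j in range(len(p)):
--         c = _cover(x[j], bounds)
--         if c == -1: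
--             sunny += p[j]
--         elif c != -2:
--             gain[c] += p[j]
--     best = max(gain, default=0)
--     return sunny + max(best, 0)
-- ===== Notes on version B (the rewrite author's own statement) =====
-- stated objective: faster
-- what changed: Replaces A's coverage dictionary plus three extra passes (sunny/dark pass and a per-cloud rescan of all towns) by a single pass over towns that classifies each town as uncovered / uniquely covered / multiply covered with an early-exit scan, accumulating per-cloud removal gains directly; the answer is sunny + max(0, max gain).
-- outside the precondition, e.g. on maximumPeople([1, 2], [], [], []): A returns 3, B raises IndexError
import Mathlib
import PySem

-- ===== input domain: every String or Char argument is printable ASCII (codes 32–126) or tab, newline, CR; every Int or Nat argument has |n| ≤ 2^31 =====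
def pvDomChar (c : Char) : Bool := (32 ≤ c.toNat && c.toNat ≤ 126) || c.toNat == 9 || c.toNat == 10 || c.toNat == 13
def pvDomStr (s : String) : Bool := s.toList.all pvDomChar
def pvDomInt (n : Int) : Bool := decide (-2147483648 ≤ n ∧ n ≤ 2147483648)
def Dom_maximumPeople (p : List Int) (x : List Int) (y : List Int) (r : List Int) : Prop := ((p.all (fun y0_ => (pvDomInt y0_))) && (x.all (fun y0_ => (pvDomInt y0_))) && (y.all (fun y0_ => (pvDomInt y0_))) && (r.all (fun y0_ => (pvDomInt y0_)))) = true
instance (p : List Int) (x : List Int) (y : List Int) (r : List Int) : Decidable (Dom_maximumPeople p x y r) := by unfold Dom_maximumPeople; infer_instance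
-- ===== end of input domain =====

-- B replaces A's coverage dictionary and its three extra passes (including a per-cloud rescan of
-- all towns) by a single pass over towns with an early-exit unique-cover scan; same O(n*m)
-- worst case, measurably faster by a constant factor (no dict, early exit, one pass).


-- ===== PORT A =====
-- Literal transliteration of A.  Indexing `xs[k]` with a nonnegative index is ported as
-- `xs.getD k 0` (`tc.getD j []` for `town_coverage[j]`): under Pre_ every index A reads is in
-- range, so the defaults are never taken.
def maximumPeople (p : List Int) (x : List Int) (y : List Int) (r : List Int) : Int :=
  let n := p.length
  let m := y.length
  -- town_coverage = {i: [] for i in range(n)}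
  let tc0 : PySem.Dict Int (List Int) :=
    (List.range n).foldl (fun d (i : Nat) => d.insert (i : Int) []) PySem.Dict.empty
  let sunny0 : Int := p.sum
  -- cloud_pop = [0] * m
  let cp0 : List Int := List.replicate m (0 : Int)
  -- first double loop: coverage (state = (town_coverage, cloud_pop))
  let st :=
    (List.range m).foldl (fun (s : PySem.Dict Int (List Int) × List Int) (i : Nat) =>
      let cs := y.getD i 0 - r.getD i 0
      let ce := y.getD i 0 + r.getD i 0
      (List.range n).foldl (fun (t : PySem.Dict Int (List Int) × List Int) (j : Nat) =>
        if cs ≤ x.getD j 0 ∧ x.getD j 0 ≤ ce then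
          (t.1.modify (j : Int) [] (fun l => l ++ [(i : Int)]),
           t.2.set i (t.2.getD i 0 + p.getD j 0))
        else t) s) (tc0, cp0)
  let tc := st.1
  -- second loop: sunny_pop / dark_pop
  let sd :=
    (List.range n).foldl (fun (s : Int × Int) (j : Nat) =>
      let cov := tc.getD (j : Int) []
      if cov ≠ [] then
        (s.1 - p.getD j 0, if 1 < cov.length then s.2 + p.getD j 0 else s.2)
      else s) (sunny0, 0)
  let sunny := sd.1
  -- third loop: best cloud to remove
  (List.range m).foldl (fun (acc : Int) (i : Nat) =>
    let pot :=
      (List.range n).foldl (fun (q : Int) (j : Nat) =>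
        let cov := tc.getD (j : Int) []
        if cov.length = 1 ∧ cov.getD 0 0 = (i : Int) then q + p.getD j 0 else q) sunny
    max acc pot) sunny

-- ===== PORT B =====
-- _cover(xj, bounds): scan the enumerated bounds; -1 = no covering cloud so far, a cloud index =
-- exactly one so far, early return -2 on a second hit.
def pvCoverGo (xj : Int) (cover : Int) : List (Int × (Int × Int)) → Int
  | [] => cover
  | q :: rest =>
    if q.2.1 ≤ xj ∧ xj ≤ q.2.2 then
      if cover ≠ -1 then -2 else pvCoverGo xj q.1 rest
    else pvCoverGo xj cover rest

def maximumPeople_alt (p : List Int) (x : List Int) (y : List Int) (r : List Int) : Int :=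
  let bounds := (y.zip r).map (fun q => (q.1 - q.2, q.1 + q.2))
  let st :=
    (List.range p.length).foldl (fun (s : Int × List Int) (j : Nat) =>
      let c := pvCoverGo (x.getD j 0) (-1) (PySem.List.enumerate bounds 0)
      if c = -1 then (s.1 + p.getD j 0, s.2)
      else if c ≠ -2 then (s.1, s.2.set c.toNat (s.2.getD c.toNat 0 + p.getD j 0))
      else s) (0, List.replicate y.length (0 : Int))
  let best := PySem.List.maxD st.2 (fun v => v) 0
  st.1 + max best 0

-- ===== PRECONDITION & SPEC =====
-- Pre_ restricts to the natural domain where every town has a position and every cloud a range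
-- (len(x) ≥ len(p), len(r) ≥ len(y)); outside it A raises IndexError, except that with zero clouds
-- A accidentally never reads x and returns sum(p), where B's natural pass still reads x[j] and raises.
def Pre_maximumPeople (p : List Int) (x : List Int) (y : List Int) (r : List Int) : Prop :=
  p.length ≤ x.length ∧ y.length ≤ r.length
instance (p : List Int) (x : List Int) (y : List Int) (r : List Int) : Decidable (Pre_maximumPeople p x y r) := by unfold Pre_maximumPeople; infer_instance

def pvWitness_maximumPeople : List Int × List Int × List Int × List Int := ([2, 3], [1, 5], [4], [2])

def Spec_maximumPeople (p : List Int) (x : List Int) (y : List Int) (r : List Int) (out : Int) : Prop := out = maximumPeople_alt p x y r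
instance (p : List Int) (x : List Int) (y : List Int) (r : List Int) (out : Int) : Decidable (Spec_maximumPeople p x y r out) := by unfold Spec_maximumPeople; infer_instance

-- ===== CLAIM (what is proved, stated in full; the proofs are below) =====
def Claim_equal_maximumPeople : Prop := ∀ (p : List Int) (x : List Int) (y : List Int) (r : List Int), Dom_maximumPeople p x y r → Pre_maximumPeople p x y r → Spec_maximumPeople p x y r (maximumPeople p x y r)

-- ===== LEMMAS AND PROOFS =====

-- The covering condition of cloud i on town j, and the list of clouds covering town j.
def pvC (x y r : List Int) (j i : Nat) : Bool :=
  decide (y.getD i 0 - r.getD i 0 ≤ x.getD j 0 ∧ x.getD j 0 ≤ y.getD i 0 + r.getD i 0)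

def pvCov (x y r : List Int) (m j : Nat) : List Int :=
  ((List.range m).filter (fun i => pvC x y r j i)).map (fun (i : Nat) => (i : Int))

-- Sunny population and per-cloud removal gain over the first N towns.
def pvS (p x y r : List Int) (m N : Nat) : Int :=
  ((List.range N).map (fun j => if pvCov x y r m j = [] then p.getD j 0 else 0)).sum

def pvG (p x y r : List Int) (m N i : Nat) : Int :=
  ((List.range N).map (fun j => if pvCov x y r m j = [(i : Int)] then p.getD j 0 else 0)).sum

-- -1 / the unique index / -2, as a function of the covering list.
def pvCode : List Int → Int
  | [] => -1
  | [i] => i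
  | _ :: _ :: _ => -2

theorem pvLen1_iff (l : List Int) (v : Int) : (l.length = 1 ∧ l.getD 0 0 = v) ↔ l = [v] := by
  match l with
  | [] => simp
  | [a] => simp [List.getD]
  | a :: b :: t => simp

theorem pvCode_cons (a : Int) (t : List Int) :
    pvCode (a :: t) = if t = [] then a else -2 := by
  cases t <;> simp [pvCode]

theorem pvSum_range_getD (p : List Int) :
    p.sum = ((List.range p.length).map (fun j => p.getD j 0)).sum := by
  congr 1
  apply List.ext_getElem
  · simp
  · intro i h1 h2
    have h1' : i < p.length := h1
    simp [List.getElem?_eq_getElem h1']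

theorem pvCov_succ (x y r : List Int) (m j : Nat) :
    pvCov x y r (m + 1) j = pvCov x y r m j ++ (if pvC x y r j m then [(m : Int)] else []) := by
  by_cases h : pvC x y r j m <;>
    simp [pvCov, List.range_succ, List.filter_append, h]

theorem pvMem_pvCov (x y r : List Int) (m j : Nat) (v : Int) (hv : v ∈ pvCov x y r m j) :
    ∃ k : Nat, k < m ∧ v = (k : Int) := by
  simp only [pvCov, List.mem_map] at hv
  obtain ⟨k, hk, rfl⟩ := hv
  exact ⟨k, List.mem_range.mp (List.mem_of_mem_filter hk), rfl⟩

-- A: the initial dictionary maps every key to [].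
theorem pvTc0_getD (N : Nat) (k : Int) :
    (((List.range N).foldl (fun d (i : Nat) => d.insert (i : Int) []) PySem.Dict.empty :
      PySem.Dict Int (List Int))).getD k [] = [] := by
  induction N with
  | zero => simp [PySem.Dict.getD_empty]
  | succ N ih =>
    rw [List.range_succ, List.foldl_append]
    simp only [List.foldl_cons, List.foldl_nil]
    rw [PySem.Dict.getD_insert]
    split_ifs <;> simp [ih]

-- A: effect of one cloud's inner town loop on one key of the dictionary.
theorem pvInner_getD (x y r : List Int) (i : Nat) (N : Nat) (d : PySem.Dict Int (List Int)) (j0 : Nat) :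
    ((List.range N).foldl (fun d (j : Nat) =>
        if y.getD i 0 - r.getD i 0 ≤ x.getD j 0 ∧ x.getD j 0 ≤ y.getD i 0 + r.getD i 0 then
          d.modify (j : Int) [] (fun l => l ++ [(i : Int)])
        else d) d).getD (j0 : Int) []
      = if j0 < N ∧ pvC x y r j0 i then d.getD (j0 : Int) [] ++ [(i : Int)]
        else d.getD (j0 : Int) [] := by
  induction N generalizing d j0 with
  | zero => simp
  | succ N ih =>
    rw [List.range_succ, List.foldl_append]
    simp only [List.foldl_cons, List.foldl_nil]
    by_cases hc : y.getD i 0 - r.getD i 0 ≤ x.getD N 0 ∧ x.getD N 0 ≤ y.getD i 0 + r.getD i 0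
    · rw [if_pos hc, PySem.Dict.getD_modify]
      by_cases hj : j0 = N
      · subst hj
        rw [if_pos rfl, ih]
        have hC : pvC x y r j0 i = true := by
          unfold pvC; simp only [decide_eq_true_eq]; exact hc
        have hlt : ¬ (j0 < j0 ∧ pvC x y r j0 i = true) := by omega
        rw [if_neg hlt, if_pos ⟨by omega, hC⟩]
      · have hne : (j0 : Int) ≠ (N : Int) := by exact_mod_cast hj
        rw [if_neg hne, ih]
        have h1 : (j0 < N + 1 ∧ pvC x y r j0 i = true) ↔ (j0 < N ∧ pvC x y r j0 i = true) := by
          constructor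
          · rintro ⟨h, h'⟩; exact ⟨by omega, h'⟩
          · rintro ⟨h, h'⟩; exact ⟨by omega, h'⟩
        simp only [h1]
    · rw [if_neg hc, ih]
      by_cases hj : j0 = N
      · subst hj
        have hC : ¬ pvC x y r j0 i = true := by
          unfold pvC; simp only [decide_eq_true_eq]; exact hc
        simp [hC]
      · have h1 : (j0 < N + 1 ∧ pvC x y r j0 i = true) ↔ (j0 < N ∧ pvC x y r j0 i = true) := by
          constructor
          · rintro ⟨h, h'⟩
            rcases Nat.lt_succ_iff_lt_or_eq.mp h with h | h
            · exact ⟨h, h'⟩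
            · exact absurd h hj
          · rintro ⟨h, h'⟩; exact ⟨by omega, h'⟩
        simp only [h1]

-- A: the dictionary after the whole double loop holds exactly the covering lists.
theorem pvTc_getD (p x y r : List Int) (m : Nat) (j0 : Nat) :
    ((List.range m).foldl (fun d (i : Nat) =>
        (List.range p.length).foldl (fun d (j : Nat) =>
          if y.getD i 0 - r.getD i 0 ≤ x.getD j 0 ∧ x.getD j 0 ≤ y.getD i 0 + r.getD i 0 then
            d.modify (j : Int) [] (fun l => l ++ [(i : Int)])
          else d) d)
      ((List.range p.length).foldl (fun d (i : Nat) => d.insert (i : Int) []) PySem.Dict.empty)).getD (j0 : Int) []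
      = if j0 < p.length then pvCov x y r m j0 else [] := by
  induction m with
  | zero =>
    rw [List.range_zero, List.foldl_nil, pvTc0_getD p.length (j0 : Int)]
    simp [pvCov]
  | succ m ih =>
    rw [List.range_succ, List.foldl_append]
    simp only [List.foldl_cons, List.foldl_nil]
    rw [pvInner_getD, ih]
    by_cases hj : j0 < p.length
    · rw [pvCov_succ]
      by_cases hC : pvC x y r j0 m <;> simp [hj, hC]
    · simp [hj]

-- A: the pair-state folds project to their first components.
theorem pvInner_fst (p x y r : List Int) (i : Nat) (L : List Nat)
    (s : PySem.Dict Int (List Int) × List Int) :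
    (L.foldl (fun (t : PySem.Dict Int (List Int) × List Int) (j : Nat) =>
        if y.getD i 0 - r.getD i 0 ≤ x.getD j 0 ∧ x.getD j 0 ≤ y.getD i 0 + r.getD i 0 then
          (t.1.modify (j : Int) [] (fun l => l ++ [(i : Int)]),
           t.2.set i (t.2.getD i 0 + p.getD j 0))
        else t) s).1
      = L.foldl (fun d (j : Nat) =>
          if y.getD i 0 - r.getD i 0 ≤ x.getD j 0 ∧ x.getD j 0 ≤ y.getD i 0 + r.getD i 0 then
            d.modify (j : Int) [] (fun l => l ++ [(i : Int)])
          else d) s.1 := by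
  induction L generalizing s with
  | nil => rfl
  | cons j L ih =>
    simp only [List.foldl_cons]
    rw [ih]
    by_cases hc : y.getD i 0 - r.getD i 0 ≤ x.getD j 0 ∧ x.getD j 0 ≤ y.getD i 0 + r.getD i 0
    · rw [if_pos hc, if_pos hc]
    · rw [if_neg hc, if_neg hc]

theorem pvOuter_fst (p x y r : List Int) (L : List Nat)
    (s : PySem.Dict Int (List Int) × List Int) :
    (L.foldl (fun (s : PySem.Dict Int (List Int) × List Int) (i : Nat) =>
        (List.range p.length).foldl (fun (t : PySem.Dict Int (List Int) × List Int) (j : Nat) =>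
          if y.getD i 0 - r.getD i 0 ≤ x.getD j 0 ∧ x.getD j 0 ≤ y.getD i 0 + r.getD i 0 then
            (t.1.modify (j : Int) [] (fun l => l ++ [(i : Int)]),
             t.2.set i (t.2.getD i 0 + p.getD j 0))
          else t) s) s).1
      = L.foldl (fun d (i : Nat) =>
          (List.range p.length).foldl (fun d (j : Nat) =>
            if y.getD i 0 - r.getD i 0 ≤ x.getD j 0 ∧ x.getD j 0 ≤ y.getD i 0 + r.getD i 0 then
              d.modify (j : Int) [] (fun l => l ++ [(i : Int)])
            else d) d) s.1 := by
  induction L generalizing s with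
  | nil => rfl
  | cons i L ih =>
    simp only [List.foldl_cons]
    rw [ih, pvInner_fst]

theorem pvSd_fst (p : List Int) (tc : PySem.Dict Int (List Int)) (L : List Nat) (s : Int × Int) :
    (L.foldl (fun (s : Int × Int) (j : Nat) =>
        if tc.getD (j : Int) [] ≠ [] then
          (s.1 - p.getD j 0,
           if 1 < (tc.getD (j : Int) []).length then s.2 + p.getD j 0 else s.2)
        else s) s).1
      = L.foldl (fun a (j : Nat) => if tc.getD (j : Int) [] ≠ [] then a - p.getD j 0 else a) s.1 := by
  induction L generalizing s with
  | nil => rfl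
  | cons j L ih =>
    simp only [List.foldl_cons]
    rw [ih]
    by_cases hc : tc.getD (j : Int) [] ≠ [] <;> simp [hc]

-- shifting a constant out of a running max
theorem pvMaxfold_shift (G : Nat → Int) (L : List Nat) (S : Int) :
    ∀ a : Int, L.foldl (fun acc i => max acc (S + G i)) (S + a)
      = S + L.foldl (fun acc i => max acc (G i)) a := by
  induction L with
  | nil => intro a; rfl
  | cons i L ih =>
    intro a
    simp only [List.foldl_cons]
    rw [max_add_add_left S a (G i), ih]

theorem pvFoldl_max_shift (t : List Int) : ∀ x a : Int, t.foldl max (max a x) = max a (t.foldl max x) := by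
  induction t with
  | nil => intro x a; rfl
  | cons h t ih =>
    intro x a
    simp only [List.foldl_cons]
    rw [max_assoc, ih]

-- B: the bounds list is the per-cloud interval list.
theorem pvBounds_eq (y r : List Int) (h : y.length ≤ r.length) :
    (y.zip r).map (fun q => (q.1 - q.2, q.1 + q.2))
      = (List.range y.length).map (fun (i : Nat) => (y.getD i 0 - r.getD i 0, y.getD i 0 + r.getD i 0)) := by
  apply List.ext_getElem
  · simp; omega
  · intro i h1 h2
    have hy : i < y.length := by simp at h1; omega
    have hr : i < r.length := by simp at h1; omega
    simp [List.getElem_zip, List.getD, List.getElem?_eq_getElem hy, List.getElem?_eq_getElem hr]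

theorem pvEnum_map_range {α : Type} (f : Nat → α) (m : Nat) :
    PySem.List.enumerate ((List.range m).map f) 0
      = (List.range m).map (fun (i : Nat) => ((i : Int), f i)) := by
  induction m with
  | zero => rfl
  | succ m ih =>
    rw [List.range_succ, List.map_append, List.map_append,
      PySem.List.enumerate_append, ih]
    simp [PySem.List.enumerate_cons]

-- B: the cover scan once a unique cloud has been seen.
theorem pvCoverGo_pos (xj : Int) (L : List (Int × (Int × Int))) :
    ∀ c : Int, 0 ≤ c →
      pvCoverGo xj c L
        = if L.filter (fun q => decide (q.2.1 ≤ xj ∧ xj ≤ q.2.2)) = [] then c else -2 := by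
  induction L with
  | nil => intro c _; simp [pvCoverGo]
  | cons q L ih =>
    intro c hc
    by_cases hq : q.2.1 ≤ xj ∧ xj ≤ q.2.2
    · have hne : c ≠ -1 := by omega
      simp only [pvCoverGo, if_pos hq, if_pos hne]
      rw [List.filter_cons_of_pos (by simpa using hq)]
      simp
    · simp only [pvCoverGo, if_neg hq]
      rw [ih c hc, List.filter_cons_of_neg (by simpa using hq)]

-- B: the cover scan computes pvCode of the list of hit indices.
theorem pvCoverGo_code (xj : Int) (L : List (Int × (Int × Int)))
    (h : ∀ q ∈ L, 0 ≤ q.1) :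
    pvCoverGo xj (-1) L
      = pvCode ((L.filter (fun q => decide (q.2.1 ≤ xj ∧ xj ≤ q.2.2))).map (fun q => q.1)) := by
  induction L with
  | nil => rfl
  | cons q L ih =>
    by_cases hq : q.2.1 ≤ xj ∧ xj ≤ q.2.2
    · simp only [pvCoverGo, if_pos hq]
      have h0 : (0:Int) ≤ q.1 := h q (by simp)
      have hni : ¬ ((-1:Int) ≠ -1) := by simp
      rw [if_neg hni, pvCoverGo_pos xj L q.1 h0,
        List.filter_cons_of_pos (by simpa using hq), List.map_cons, pvCode_cons]
      by_cases he : L.filter (fun q => decide (q.2.1 ≤ xj ∧ xj ≤ q.2.2)) = []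
      · rw [he]
        simp
      · rw [if_neg he, if_neg (by simpa using he)]
    · simp only [pvCoverGo, if_neg hq]
      rw [ih (fun q hqL => h q (by simp [hqL]))]
      rw [List.filter_cons_of_neg (by simpa using hq)]

-- B: _cover(x[j], bounds) = pvCode (pvCov j).
theorem pvCover_eq_code (x y r : List Int) (h : y.length ≤ r.length) (j : Nat) :
    pvCoverGo (x.getD j 0) (-1)
        (PySem.List.enumerate ((y.zip r).map (fun q => (q.1 - q.2, q.1 + q.2))) 0)
      = pvCode (pvCov x y r y.length j) := by
  rw [pvBounds_eq y r h, pvEnum_map_range, pvCoverGo_code]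
  · rw [List.filter_map, List.map_map]
    congr 1
  · intro q hq
    simp only [List.mem_map, List.mem_range] at hq
    obtain ⟨i, _, rfl⟩ := hq
    exact Int.natCast_nonneg i

-- B: invariant of the single pass over towns.
theorem pvB_invariant (p x y r : List Int) (h : y.length ≤ r.length) (N : Nat) :
    (List.range N).foldl (fun (s : Int × List Int) (j : Nat) =>
        if pvCoverGo (x.getD j 0) (-1)
            (PySem.List.enumerate ((y.zip r).map (fun q => (q.1 - q.2, q.1 + q.2))) 0) = -1 then
          (s.1 + p.getD j 0, s.2)
        else if pvCoverGo (x.getD j 0) (-1)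
            (PySem.List.enumerate ((y.zip r).map (fun q => (q.1 - q.2, q.1 + q.2))) 0) ≠ -2 then
          (s.1, s.2.set (pvCoverGo (x.getD j 0) (-1)
              (PySem.List.enumerate ((y.zip r).map (fun q => (q.1 - q.2, q.1 + q.2))) 0)).toNat
            (s.2.getD (pvCoverGo (x.getD j 0) (-1)
              (PySem.List.enumerate ((y.zip r).map (fun q => (q.1 - q.2, q.1 + q.2))) 0)).toNat 0 + p.getD j 0))
        else s) (0, List.replicate y.length (0 : Int))
      = (pvS p x y r y.length N,
         (List.range y.length).map (fun i => pvG p x y r y.length N i)) := by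
  induction N with
  | zero =>
    simp [pvS, pvG, List.map_const']
  | succ N ih =>
    rw [List.range_succ, List.foldl_append]
    simp only [List.foldl_cons, List.foldl_nil]
    rw [ih]
    simp only [pvCover_eq_code x y r h N]
    have hS : pvS p x y r y.length (N + 1)
        = pvS p x y r y.length N + (if pvCov x y r y.length N = [] then p.getD N 0 else 0) := by
      simp [pvS, List.range_succ]
    have hG : ∀ i, pvG p x y r y.length (N + 1) i
        = pvG p x y r y.length N i
          + (if pvCov x y r y.length N = [(i : Int)] then p.getD N 0 else 0) := by
      intro i; simp [pvG, List.range_succ]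
    match hcov : pvCov x y r y.length N with
    | [] =>
      simp only [pvCode]
      rw [if_pos trivial, Prod.ext_iff]
      constructor
      · rw [hS, hcov]; simp
      · apply List.ext_getElem
        · simp
        · intro i h1 h2
          simp only [List.getElem_map, List.getElem_range]
          rw [hG]
          simp [hcov]
    | [v] =>
      obtain ⟨k, hk, rfl⟩ := pvMem_pvCov x y r y.length N v (by rw [hcov]; simp)
      simp only [pvCode]
      rw [if_neg (by omega), if_pos (by omega), Prod.ext_iff]
      constructor
      · rw [hS, hcov]; simp
      · simp only [Int.toNat_natCast]
        rw [PySem.List.getD_map_range _ _ _ _ hk]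
        apply List.ext_getElem
        · simp
        · intro i h1 h2
          have him : i < y.length := by simpa using h1
          rw [List.getElem_set]
          simp only [List.getElem_map, List.getElem_range]
          rw [hG]
          by_cases hik : i = k
          · subst hik
            simp [hcov]
          · have hne : ¬ pvCov x y r y.length N = [(i : Int)] := by
              rw [hcov]; simp; omega
            have hki : ¬ k = i := fun hh => hik hh.symm
            simp [hne]
            exact fun hh => absurd hh hki
    | a :: b :: t =>
      simp only [pvCode]
      rw [if_neg (by norm_num), if_neg (by norm_num), Prod.ext_iff]
      constructor
      · rw [hS, hcov]; simp
      · apply List.ext_getElem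
        · simp
        · intro i h1 h2
          simp only [List.getElem_map, List.getElem_range]
          rw [hG]
          simp [hcov]

-- A: the two town passes and the cloud pass, over an abstract dictionary that holds the covering lists.
theorem pvA_loops (p x y r : List Int) (d : PySem.Dict Int (List Int))
    (hd : ∀ j : Nat, d.getD (j : Int) [] = if j < p.length then pvCov x y r y.length j else []) :
    (List.range y.length).foldl (fun (acc : Int) (i : Nat) =>
        max acc ((List.range p.length).foldl (fun (q : Int) (j : Nat) =>
            if (d.getD (j : Int) []).length = 1 ∧ (d.getD (j : Int) []).getD 0 0 = (i : Int) then
              q + p.getD j 0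
            else q)
          ((List.range p.length).foldl
            (fun (a : Int) (j : Nat) => if d.getD (j : Int) [] ≠ [] then a - p.getD j 0 else a) p.sum)))
      ((List.range p.length).foldl
        (fun (a : Int) (j : Nat) => if d.getD (j : Int) [] ≠ [] then a - p.getD j 0 else a) p.sum)
      = (List.range y.length).foldl (fun (acc : Int) (i : Nat) =>
          max acc (pvS p x y r y.length p.length + pvG p x y r y.length p.length i))
        (pvS p x y r y.length p.length) := by
  have hsun : (List.range p.length).foldl
      (fun (a : Int) (j : Nat) => if d.getD (j : Int) [] ≠ [] then a - p.getD j 0 else a) p.sum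
      = pvS p x y r y.length p.length := by
    rw [PySem.List.foldl_congr_mem _ _
      (fun (a : Int) (j : Nat) => a + (if pvCov x y r y.length j = [] then 0 else -(p.getD j 0))) _
      (by
        intro a j hj
        rw [hd j, if_pos (List.mem_range.mp hj)]
        by_cases hc : pvCov x y r y.length j = [] <;> simp [hc, sub_eq_add_neg])]
    rw [PySem.List.foldl_add]
    conv_lhs => rw [pvSum_range_getD p]
    rw [← PySem.List.sum_map_add_int]
    unfold pvS
    congr 1
    apply List.map_congr_left
    intro j _
    by_cases hc : pvCov x y r y.length j = [] <;> simp [hc]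
  rw [hsun]
  rw [PySem.List.foldl_congr_mem _ _
    (fun (acc : Int) (i : Nat) =>
      max acc (pvS p x y r y.length p.length + pvG p x y r y.length p.length i)) _ ?_]
  intro acc i _
  congr 1
  rw [PySem.List.foldl_congr_mem _ _
    (fun (q : Int) (j : Nat) => q + (if pvCov x y r y.length j = [(i : Int)] then p.getD j 0 else 0)) _
    (by
      intro q j hj
      rw [hd j, if_pos (List.mem_range.mp hj),
        if_congr (pvLen1_iff (pvCov x y r y.length j) (i : Int)) rfl rfl]
      by_cases hc : pvCov x y r y.length j = [(i : Int)] <;> simp [hc])]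
  rw [PySem.List.foldl_add]
  rfl

-- A evaluates to the running max of sunny + gain.
theorem pvA_eval (p x y r : List Int) :
    maximumPeople p x y r
      = (List.range y.length).foldl (fun (acc : Int) (i : Nat) =>
          max acc (pvS p x y r y.length p.length + pvG p x y r y.length p.length i))
        (pvS p x y r y.length p.length) := by
  simp only [maximumPeople]
  rw [pvOuter_fst, pvSd_fst]
  exact pvA_loops p x y r _ (pvTc_getD p x y r y.length)

-- B evaluates to sunny + max(0, max gain).
theorem pvB_eval (p x y r : List Int) (h : y.length ≤ r.length) :
    maximumPeople_alt p x y r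
      = pvS p x y r y.length p.length
        + max (PySem.List.maxD
            ((List.range y.length).map (fun i => pvG p x y r y.length p.length i)) (fun v => v) 0) 0 := by
  simp only [maximumPeople_alt]
  rw [pvB_invariant p x y r h p.length]

-- the running max of S + G equals S + max(0, max G) (with max over an empty list read as 0)
theorem pvFinal (S : Int) (G : Nat → Int) (L : List Nat) :
    L.foldl (fun (acc : Int) (i : Nat) => max acc (S + G i)) S
      = S + max (PySem.List.maxD (L.map G) (fun v => v) 0) 0 := by
  cases L with
  | nil => simp [PySem.List.maxD, PySem.List.max?]
  | cons c L =>
    simp only [List.foldl_cons, List.map_cons, PySem.List.maxD_id_cons]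
    have h1 : max S (S + G c) = S + max 0 (G c) := by
      rw [← max_add_add_left S 0 (G c), add_zero]
    rw [h1, pvMaxfold_shift G L S (max 0 (G c)), ← List.foldl_map (f := G) (g := max),
      pvFoldl_max_shift (L.map G) (G c) 0, max_comm]

-- ===== VERDICT (by name: the statement is the Claim_ definition above) =====
theorem maximumPeople_spec : Claim_equal_maximumPeople := by
  intro p x y r _hdom hpre
  unfold Spec_maximumPeople
  rw [pvA_eval, pvB_eval p x y r hpre.2, pvFinal]
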